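-- pv_equiv track=rewrite | github.com/ncurrault/advent-of-code | 2022/22/22-2.py | should_reverse
-- ===== SOURCE A (Python) =====
-- from enum import Enum
--
-- class FaceSide(str, Enum):
--     LEFT = "LEFT"
--     RIGHT = "RIGHT"
--     TOP = "TOP"
--     BOTTOM = "BOTTOM"
--
-- def should_reverse(side_a, side_b):
--     if side_a == side_b:
--         return True
--     match (side_a, side_b):
--         case (FaceSide.TOP, FaceSide.LEFT):
--             return False
--         case (FaceSide.TOP, FaceSide.RIGHT):
--             return True
--         case (FaceSide.TOP, FaceSide.BOTTOM):
--             return False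
--         case (FaceSide.LEFT, FaceSide.RIGHT):
--             return False
--         case (FaceSide.LEFT, FaceSide.BOTTOM):
--             return True
--         case (FaceSide.RIGHT, FaceSide.BOTTOM):
--             return False
--         case _:
--             return should_reverse(side_b, side_a)
-- ===== SOURCE B (Python) =====
-- from enum import Enum
--
-- class FaceSide(str, Enum):
--     LEFT = "LEFT"
--     RIGHT = "RIGHT"
--     TOP = "TOP"
--     BOTTOM = "BOTTOM"
--
-- # each face side belongs to one of two orientation classes
-- FLIP_CLASS = {
--     FaceSide.TOP: 0,
--     FaceSide.RIGHT: 0,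
--     FaceSide.LEFT: 1,
--     FaceSide.BOTTOM: 1,
-- }
--
-- def should_reverse(side_a, side_b):
--     # identical sides always reverse; otherwise reversal is needed exactly
--     # when the two sides share an orientation class — this per-side
--     # single-bit classifier has A's six-case pair table as its kernel
--     return side_a == side_b or FLIP_CLASS[side_a] == FLIP_CLASS[side_b]
-- ===== Notes on version B (the rewrite author's own statement) =====
-- stated objective: simpler
-- what changed: Replaced the recursive swap-and-match six-case pair ladder with a per-side single-bit classifier: each side maps to one of two orientation classes ({TOP,RIGHT}=0, {LEFT,BOTTOM}=1) and the result is whether the classes agree; no pair table and no recursion remain.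
import Mathlib
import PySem

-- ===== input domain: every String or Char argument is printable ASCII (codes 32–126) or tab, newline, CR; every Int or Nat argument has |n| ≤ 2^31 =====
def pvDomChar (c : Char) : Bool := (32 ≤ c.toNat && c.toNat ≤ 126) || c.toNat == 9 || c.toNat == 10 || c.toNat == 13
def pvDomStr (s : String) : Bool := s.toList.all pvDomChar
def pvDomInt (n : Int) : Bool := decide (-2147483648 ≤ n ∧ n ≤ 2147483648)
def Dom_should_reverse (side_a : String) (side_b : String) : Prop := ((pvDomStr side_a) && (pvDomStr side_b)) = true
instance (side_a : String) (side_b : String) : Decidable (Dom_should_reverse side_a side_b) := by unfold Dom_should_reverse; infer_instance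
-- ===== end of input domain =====

-- B replaces A's recursive swap-and-match pair ladder with a per-side single-bit
-- class test (objective: simpler): reverse iff both sides lie in the same class.

-- ===== PORT A =====
-- A's recursion on swapped arguments can fail to terminate (Python: RecursionError);
-- fuel models Python's recursion limit, none = RecursionError (excluded by Pre_).
def should_reverse_goA : Nat → String → String → Option Bool
  | 0, _, _ => none
  | Nat.succ n, side_a, side_b =>
    if side_a == side_b then some true
    else if side_a == "TOP" && side_b == "LEFT" then some false
    else if side_a == "TOP" && side_b == "RIGHT" then some true
    else if side_a == "TOP" && side_b == "BOTTOM" then some false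
    else if side_a == "LEFT" && side_b == "RIGHT" then some false
    else if side_a == "LEFT" && side_b == "BOTTOM" then some true
    else if side_a == "RIGHT" && side_b == "BOTTOM" then some false
    else should_reverse_goA n side_b side_a

def should_reverse (side_a : String) (side_b : String) : Bool :=
  (should_reverse_goA 1000 side_a side_b).getD false

-- ===== PORT B =====
-- FLIP_CLASS: the per-side orientation-class dict; Python's KeyError on a
-- side outside the map (outside Pre_) is the 'none' of get?, rendered getD.
def should_reverse_flipClassDict : PySem.Dict String Int :=
  PySem.Dict.ofList [("TOP", 0), ("RIGHT", 0), ("LEFT", 1), ("BOTTOM", 1)]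

def should_reverse_alt (side_a : String) (side_b : String) : Bool :=
  side_a == side_b ||
    ((should_reverse_flipClassDict.get? side_a).getD 0
      == (should_reverse_flipClassDict.get? side_b).getD 0)

-- ===== PRECONDITION & SPEC =====
-- Pre_ excludes exactly the inputs on which A raises RecursionError:
-- distinct sides with either side not one of the four face-side names.
def Pre_should_reverse (side_a : String) (side_b : String) : Prop :=
  side_a = side_b ∨
    (side_a ∈ ["LEFT", "RIGHT", "TOP", "BOTTOM"] ∧ side_b ∈ ["LEFT", "RIGHT", "TOP", "BOTTOM"])
instance (side_a : String) (side_b : String) : Decidable (Pre_should_reverse side_a side_b) := by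
  unfold Pre_should_reverse; infer_instance

def pvWitness_should_reverse : String × String := ("TOP", "LEFT")

def Spec_should_reverse (side_a : String) (side_b : String) (out : Bool) : Prop :=
  out = should_reverse_alt side_a side_b
instance (side_a : String) (side_b : String) (out : Bool) : Decidable (Spec_should_reverse side_a side_b out) := by
  unfold Spec_should_reverse; infer_instance

-- ===== CLAIM =====
def Claim_equal_should_reverse : Prop := ∀ (side_a : String) (side_b : String), Dom_should_reverse side_a side_b → Pre_should_reverse side_a side_b → Spec_should_reverse side_a side_b (should_reverse side_a side_b)

-- ===== LEMMAS AND PROOFS =====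
theorem should_reverse_refl (s : String) : should_reverse s s = true := by
  have h : should_reverse_goA 1000 s s = some true := by
    rw [show (1000 : Nat) = Nat.succ 999 from rfl, should_reverse_goA]
    simp
  simp [should_reverse, h]

-- ===== VERDICT =====
theorem should_reverse_spec : Claim_equal_should_reverse := by
  intro side_a side_b _ hpre
  unfold Spec_should_reverse
  rcases hpre with h | ⟨ha, hb⟩
  · subst h
    rw [should_reverse_refl]
    simp [should_reverse_alt]
  · fin_cases ha <;> fin_cases hb <;>
      decide
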